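-- pv_equiv track=rewrite | github.com/aaaaltaaaa/Apriori | apriori.py | createC1
-- ===== SOURCE A (Python) =====
-- def createC1(dataSet):
--     C1 = []
--     for transaction in dataSet:#遍历
--         for item in transaction:
--             if not [item] in C1:
--                 C1.append([item])
--     C1.sort()
--     return C1
-- ===== SOURCE B (Python) =====
-- def createC1(dataSet):
--     items = []
--     for transaction in dataSet:
--         items.extend(transaction)
--     items.sort()
--     C1 = []
--     for item in items:
--         if not C1 or C1[-1] != [item]:
--             C1.append([item])
--     return C1
-- ===== Notes on version B (the rewrite author's own statement) =====
-- stated objective: faster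
-- what changed: Replaces A's quadratic repeated membership scan over the growing C1 list with flatten-then-sort followed by a single adjacent-dedup pass.
import Mathlib
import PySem

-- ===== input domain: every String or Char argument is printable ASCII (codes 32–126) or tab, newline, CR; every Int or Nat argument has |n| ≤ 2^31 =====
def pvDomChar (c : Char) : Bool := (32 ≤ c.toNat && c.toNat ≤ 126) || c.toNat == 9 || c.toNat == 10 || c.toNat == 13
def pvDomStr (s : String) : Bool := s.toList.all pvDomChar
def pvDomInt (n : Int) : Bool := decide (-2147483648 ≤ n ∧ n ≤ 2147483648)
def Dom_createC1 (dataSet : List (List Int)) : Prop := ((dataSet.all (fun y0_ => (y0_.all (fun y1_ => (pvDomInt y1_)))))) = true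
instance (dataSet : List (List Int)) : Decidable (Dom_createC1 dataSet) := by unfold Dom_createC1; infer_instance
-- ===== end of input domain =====

-- B replaces A's quadratic membership scan by flatten + sort + one adjacent-dedup pass (faster).

-- ===== PORT A =====
def createC1 (dataSet : List (List Int)) : List (List Int) :=
  let C1 := dataSet.foldl (fun C1 transaction =>
    transaction.foldl (fun C1 item =>
      if [item] ∈ C1 then C1 else C1 ++ [[item]]) C1) []
  PySem.List.sorted C1 (fun x => x) false

-- ===== PORT B =====
def createC1_alt (dataSet : List (List Int)) : List (List Int) :=
  let items := dataSet.foldl (fun acc transaction => acc ++ transaction) []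
  let items := PySem.List.sorted items (fun x => x) false
  items.foldl (fun C1 item =>
    if C1 = [] ∨ C1.getLast? ≠ some [item] then C1 ++ [[item]] else C1) []

-- ===== PRECONDITION & SPEC =====
def Spec_createC1 (dataSet : List (List Int)) (out : List (List Int)) : Prop := out = createC1_alt dataSet
instance (dataSet : List (List Int)) (out : List (List Int)) : Decidable (Spec_createC1 dataSet out) := by unfold Spec_createC1; infer_instance

-- ===== CLAIM (what is proved, stated in full; the proofs are below) =====
def Claim_equal_createC1 : Prop := ∀ (dataSet : List (List Int)), Dom_createC1 dataSet → Spec_createC1 dataSet (createC1 dataSet)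

-- ===== LEMMAS AND PROOFS =====

-- first-occurrence dedup fold (A's loop body on the underlying ints)
def pvF (ys : List Int) (acc : List Int) : List Int :=
  ys.foldl (fun a x => if x ∈ a then a else a ++ [x]) acc

lemma pvLtSingle (a b : Int) : (([a] : List Int) < [b]) ↔ a < b := by
  constructor
  · intro h
    rcases (List.cons_lt_cons_iff).mp h with h | ⟨_, h⟩
    · exact h
    · exact absurd h (List.not_lt_nil _)
  · intro h; exact List.cons_lt_cons_iff.mpr (Or.inl h)

lemma pvMemF (ys : List Int) : ∀ acc a, a ∈ pvF ys acc ↔ a ∈ acc ∨ a ∈ ys := by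
  induction ys with
  | nil => simp [pvF]
  | cons y ys ih =>
    intro acc a
    simp only [pvF, List.foldl_cons]
    by_cases h : y ∈ acc
    · simp only [if_pos h]
      rw [show List.foldl _ acc ys = pvF ys acc from rfl, ih]
      constructor
      · exact fun ha => ha.imp id (List.mem_cons_of_mem _)
      · rintro (ha | ha)
        · exact Or.inl ha
        · rcases List.mem_cons.mp ha with rfl | ha
          · exact Or.inl h
          · exact Or.inr ha
    · simp only [if_neg h]
      rw [show List.foldl _ (acc ++ [y]) ys = pvF ys (acc ++ [y]) from rfl, ih]
      simp [List.mem_append, or_assoc, List.mem_cons]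
    
lemma pvNodupF (ys : List Int) : ∀ acc, acc.Nodup → (pvF ys acc).Nodup := by
  induction ys with
  | nil => intro acc h; simpa [pvF] using h
  | cons y ys ih =>
    intro acc hacc
    simp only [pvF, List.foldl_cons]
    by_cases h : y ∈ acc
    · simpa only [if_pos h] using ih acc hacc
    · refine if_neg h ▸ ih (acc ++ [y]) ?_
      have hne : ∀ a ∈ acc, ¬a = y := fun a ha hc => h (hc ▸ ha)
      simpa [List.nodup_append, hacc] using hne

-- A's nested loop = pvF on the flattened data, wrapped in singletons
lemma pvFoldA_map (ys : List Int) : ∀ acc : List Int,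
    ys.foldl (fun C1 x => if [x] ∈ C1 then C1 else C1 ++ [[x]]) (acc.map (fun x => [x]))
      = (pvF ys acc).map (fun x => [x]) := by
  induction ys with
  | nil => intro acc; rfl
  | cons y ys ih =>
    intro acc
    simp only [List.foldl_cons, pvF]
    have hmem : ([y] ∈ acc.map (fun x => [x])) ↔ y ∈ acc := by simp
    by_cases h : y ∈ acc
    · rw [if_pos (hmem.mpr h), if_pos h]; exact ih acc
    · rw [if_neg (fun hc => h (hmem.mp hc)), if_neg h]
      have : acc.map (fun x => [x]) ++ [[y]] = (acc ++ [y]).map (fun x => [x]) := by simp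
      rw [this]; exact ih (acc ++ [y])

-- adjacent dedup relative to the last kept element
def pvAdj : List Int → Int → List Int
  | [], _ => []
  | x :: xs, m => if x = m then pvAdj xs m else x :: pvAdj xs x

def pvE : List Int → List Int
  | [] => []
  | x :: r => x :: pvAdj r x

lemma pvFoldB_go (s : List Int) : ∀ (d : List (List Int)) (m : Int),
    s.foldl (fun C1 x => if C1 = [] ∨ C1.getLast? ≠ some [x] then C1 ++ [[x]] else C1)
        (d ++ [[m]])
      = d ++ [[m]] ++ (pvAdj s m).map (fun x => [x]) := by
  induction s with
  | nil => intro d m; simp [pvAdj]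
  | cons x xs ih =>
    intro d m
    simp only [List.foldl_cons, pvAdj]
    have hlast : (d ++ [[m]]).getLast? = some [m] := by
      simp [List.getLast?_append]
    by_cases h : x = m
    · subst h
      rw [if_neg (by simp [hlast])]
      simpa using ih d x
    · rw [if_pos (Or.inr (by simp [hlast]; exact fun hc => h hc.symm))]
      rw [if_neg h]
      have := ih (d ++ [[m]]) x
      simpa [List.append_assoc] using this

lemma pvB_eq (s : List Int) :
    s.foldl (fun C1 x => if C1 = [] ∨ C1.getLast? ≠ some [x] then C1 ++ [[x]] else C1) []
      = (pvE s).map (fun x => [x]) := by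
  cases s with
  | nil => rfl
  | cons x r =>
    simp only [List.foldl_cons, pvE]
    simpa using pvFoldB_go r [] x

lemma pvAdj_good (s : List Int) : ∀ m, (m :: s).Pairwise (· ≤ ·) →
    ((m :: pvAdj s m).Pairwise (· < ·)) ∧ (∀ a, a ∈ m :: pvAdj s m ↔ a ∈ m :: s) := by
  induction s with
  | nil => intro m _; simp [pvAdj]
  | cons x xs ih =>
    intro m hp
    have hmx : m ≤ x := (List.pairwise_cons.mp hp).1 x (by simp)
    have hxs : (x :: xs).Pairwise (· ≤ ·) := (List.pairwise_cons.mp hp).2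
    by_cases h : x = m
    · subst h
      have := ih x hxs
      simp only [pvAdj, ite_true]
      refine ⟨this.1, fun a => ?_⟩
      have h2 := this.2 a
      simp only [List.mem_cons] at h2 ⊢
      tauto
    · have hlt : m < x := lt_of_le_of_ne hmx (fun hc => h hc.symm)
      have hx := ih x hxs
      simp only [pvAdj, if_neg h]
      constructor
      · refine List.pairwise_cons.mpr ⟨?_, hx.1⟩
        intro b hb
        rcases (hx.2 b).mp hb with hb'
        have hxb : x ≤ b := by
          rcases List.mem_cons.mp hb' with rfl | hb''
          · exact le_refl _
          · exact (List.pairwise_cons.mp hxs).1 b hb''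
        exact lt_of_lt_of_le hlt hxb
      · intro a
        simp only [List.mem_cons]
        have := hx.2 a
        simp only [List.mem_cons] at this
        tauto

lemma pvE_good (s : List Int) (h : s.Pairwise (· ≤ ·)) :
    ((pvE s).Pairwise (· < ·)) ∧ (∀ a, a ∈ pvE s ↔ a ∈ s) := by
  cases s with
  | nil => simp [pvE]
  | cons x r => exact pvAdj_good r x h

-- ===== VERDICT (by name: the statement is the Claim_ definition above) =====
theorem createC1_spec : Claim_equal_createC1 := by
  intro dataSet _
  unfold Spec_createC1 createC1 createC1_alt
  set ys := dataSet.flatten with hys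
  -- A's nested fold = singleton-wrapped pvF over the flattened data
  have hA : dataSet.foldl (fun C1 transaction =>
        transaction.foldl (fun C1 item =>
          if [item] ∈ C1 then C1 else C1 ++ [[item]]) C1) []
      = (pvF ys []).map (fun x => [x]) := by
    rw [← List.foldl_flatten]
    simpa using pvFoldA_map ys []
  -- B's flatten loop
  have hB0 : dataSet.foldl (fun acc transaction => acc ++ transaction) [] = ys := by
    simpa using PySem.List.foldl_append_eq_flatMap (fun t => t) dataSet []
  simp only [hA, hB0]
  set s := PySem.List.sorted ys (fun x => x) false with hs
  rw [pvB_eq s]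
  have hsp : s.Pairwise (· ≤ ·) := by
    simpa using PySem.List.sorted_pairwise ys (fun x => x)
  obtain ⟨hEpw, hEmem⟩ := pvE_good s hsp
  -- the two underlying int lists are permutations of each other, both nodup
  have hperm : (pvE s).Perm (pvF ys []) := by
    rw [List.perm_ext_iff_of_nodup (show (pvE s).Nodup from hEpw.imp ne_of_lt) (pvNodupF ys [] (by simp))]
    intro a
    rw [hEmem a, pvMemF ys [] a]
    have : a ∈ s ↔ a ∈ ys := PySem.List.mem_sorted ys (fun x => x) false a
    simp [this]
  have hfin := (PySem.List.sorted_eq_of_perm_of_pairwise_lt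
    ((pvF ys []).map (fun x => [x])) ((pvE s).map (fun x => [x])) (fun x => x)
    (hperm.map _)
    (by
      rw [List.pairwise_map]
      exact hEpw.imp (fun h => (pvLtSingle _ _).mpr h)))
  have hbr : @PySem.List.sorted (List Int) (List Int) List.instLT (fun a b => a.decidableLT b)
        ((pvF ys []).map (fun x => [x])) (fun x => x) false
      = @PySem.List.sorted (List Int) (List Int) List.instLinearOrder.toLT LinearOrder.toDecidableLT
        ((pvF ys []).map (fun x => [x])) (fun x => x) false := by congr 1
  exact hbr.trans hfin
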